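-- pv_equiv track=rewrite | github.com/Evergreenies/algorithms | python_algorithms/daily_coding_problem/01339_chess_bishops_attack.py | count_attacking_pairs
-- ===== SOURCE A (Python) =====
-- def count_attacking_pairs(bishops: list[tuple]) -> int:
--     left_top_diag1, right_top_diag2 = dict(), dict()
--     count = 0
--
--     for row, col in bishops:
--         # count pairs in diagonal (top-left to bottom-right)
--         left_top_index = row - col
--         count += left_top_diag1.get(left_top_index, 0)
--         left_top_diag1[left_top_index] = left_top_diag1.get(left_top_index, 0) + 1
--
--         # count pairs in diagonal (top-right to bottom-left)
--         right_top_index = row + col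
--         count += right_top_diag2.get(right_top_index, 0)
--         right_top_diag2[right_top_index] = right_top_diag2.get(right_top_index, 0) + 1
--
--     return count
-- ===== SOURCE B (Python) =====
-- def count_attacking_pairs(bishops: list[tuple]) -> int:
--     # Sort the diagonal keys and count pairs inside each maximal run of equal
--     # keys by a linear scan -- no hash tables at all.
--     def pairs_on_diagonal(keys):
--         keys = sorted(keys)
--         total, run = 0, 0
--         prev = None
--         for k in keys:
--             if prev is not None and k == prev:
--                 run += 1
--             else:
--                 total += run * (run - 1) // 2
--                 run = 1
--             prev = k
--         return total + run * (run - 1) // 2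
--
--     return pairs_on_diagonal([r - c for r, c in bishops]) + \
--            pairs_on_diagonal([r + c for r, c in bishops])
-- ===== Notes on version B (the rewrite author's own statement) =====
-- stated objective: alternative
-- what changed: A populates two diagonal-keyed hash maps and accumulates the pair count incrementally while inserting; B uses no dictionaries: it sorts each list of diagonal keys and counts run*(run-1)//2 for every maximal run of equal keys in one linear scan.
import Mathlib
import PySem

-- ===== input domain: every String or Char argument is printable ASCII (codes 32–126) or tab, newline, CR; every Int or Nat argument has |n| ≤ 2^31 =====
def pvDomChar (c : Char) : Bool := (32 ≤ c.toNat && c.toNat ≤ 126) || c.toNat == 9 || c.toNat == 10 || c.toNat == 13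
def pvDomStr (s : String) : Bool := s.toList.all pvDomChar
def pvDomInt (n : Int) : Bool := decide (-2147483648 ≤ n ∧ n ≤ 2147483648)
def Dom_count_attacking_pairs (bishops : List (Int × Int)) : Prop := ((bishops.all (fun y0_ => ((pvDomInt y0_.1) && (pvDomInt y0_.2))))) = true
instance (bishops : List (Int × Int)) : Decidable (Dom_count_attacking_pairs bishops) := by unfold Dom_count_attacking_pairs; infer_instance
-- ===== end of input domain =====

-- B replaces A's hash-map incremental pair counting by sorting each list of
-- diagonal keys and scanning runs of equal keys (objective: alternative).

-- ===== PORT A =====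
-- A's loop body: add the current occupancy of each diagonal to the running count,
-- then bump that diagonal's entry.
def pvStepA (st : PySem.Dict Int Int × PySem.Dict Int Int × Int) (rc : Int × Int) :
    PySem.Dict Int Int × PySem.Dict Int Int × Int :=
  let lt := rc.1 - rc.2
  let count1 := st.2.2 + st.1.getD lt 0
  let d1 := st.1.insert lt (st.1.getD lt 0 + 1)
  let rt := rc.1 + rc.2
  let count2 := count1 + st.2.1.getD rt 0
  let d2 := st.2.1.insert rt (st.2.1.getD rt 0 + 1)
  (d1, d2, count2)

def count_attacking_pairs (bishops : List (Int × Int)) : Int :=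
  (bishops.foldl pvStepA (PySem.Dict.empty, PySem.Dict.empty, 0)).2.2

-- ===== PORT B =====
-- run * (run - 1) // 2  (Python floor division)
def pvF (m : Int) : Int := PySem.Int.floordiv (m * (m - 1)) 2

-- B's scan body over the sorted keys: state (total, run, prev)
def pvScanStep (st : Int × Int × Option Int) (k : Int) : Int × Int × Option Int :=
  if st.2.2 = some k then (st.1, st.2.1 + 1, some k)
  else (st.1 + pvF st.2.1, 1, some k)

def pvPairsOnDiagonal (keys : List Int) : Int :=
  let st := (PySem.List.sorted keys (fun x => x) false).foldl pvScanStep (0, 0, none)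
  st.1 + pvF st.2.1

def count_attacking_pairs_alt (bishops : List (Int × Int)) : Int :=
  pvPairsOnDiagonal (bishops.map (fun rc => rc.1 - rc.2)) +
  pvPairsOnDiagonal (bishops.map (fun rc => rc.1 + rc.2))

-- ===== PRECONDITION & SPEC =====
def Spec_count_attacking_pairs (bishops : List (Int × Int)) (out : Int) : Prop := out = count_attacking_pairs_alt bishops
instance (bishops : List (Int × Int)) (out : Int) : Decidable (Spec_count_attacking_pairs bishops out) := by unfold Spec_count_attacking_pairs; infer_instance

-- ===== CLAIM (what is proved, stated in full; the proofs are below) =====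
def Claim_equal_count_attacking_pairs : Prop := ∀ (bishops : List (Int × Int)), Dom_count_attacking_pairs bishops → Spec_count_attacking_pairs bishops (count_attacking_pairs bishops)

-- ===== LEMMAS AND PROOFS =====

-- number of attacking pairs of a multiset of keys, as a sum over the distinct keys
def pvTallyCount (zs : List Int) : Int :=
  ((PySem.Set.ofList zs).map (fun k => pvF (zs.count k))).sum

-- "n choose 2" step: adding one more key to a group of n adds n pairs
lemma pv_choose2_step (n : Nat) :
    pvF ((n : Int) + 1) = pvF (n : Int) + n := by
  unfold pvF
  set c : Int := (n : Int) with hc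
  rcases Int.even_mul_succ_self c with ⟨m, hm⟩
  have h1 : (c + 1) * (c + 1 - 1) = m + m := by linear_combination hm
  have h2 : c * (c - 1) = (m - c) + (m - c) := by linear_combination hm
  rw [PySem.Int.floordiv_eq_ediv_of_pos (by omega), PySem.Int.floordiv_eq_ediv_of_pos (by omega),
    h1, h2]
  omega

-- summing a function that changed by c at exactly one element of a Nodup list
lemma pv_sum_shift (l : List Int) (x : Int) (f f' : Int → Int) (c : Int)
    (hnd : l.Nodup) (hx : x ∈ l)
    (hsame : ∀ k ∈ l, k ≠ x → f' k = f k) (hchg : f' x = f x + c) :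
    (l.map f').sum = (l.map f).sum + c := by
  induction l with
  | nil => cases hx
  | cons a t ih =>
    rcases List.mem_cons.mp hx with rfl | hxt
    · have ht : ∀ k ∈ t, f' k = f k := by
        intro k hk
        exact hsame k (List.mem_cons_of_mem _ hk)
          (fun h => (List.nodup_cons.mp hnd).1 (h ▸ hk))
      simp [List.map_congr_left ht, hchg]; ring
    · have ha : f' a = f a := hsame a (List.mem_cons_self) (fun h => (List.nodup_cons.mp hnd).1 (h ▸ hxt))
      have := ih (List.nodup_cons.mp hnd).2 hxt (fun k hk => hsame k (List.mem_cons_of_mem _ hk))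
      simp [ha, this]; ring

-- appending one occurrence raises the tally by the previous multiplicity
lemma pv_tally_append (zs : List Int) (x : Int) :
    pvTallyCount (zs ++ [x]) = pvTallyCount zs + zs.count x := by
  unfold pvTallyCount
  rw [PySem.Set.ofList_append_singleton, PySem.Set.add_eq_ite]
  by_cases hx : x ∈ PySem.Set.ofList zs
  · simp only [hx, if_true]
    apply pv_sum_shift _ x _ _ _ (PySem.Set.nodup_ofList zs) hx
    · intro k _ hk
      simp [List.count_append, Ne.symm hk]
    · have : (zs ++ [x]).count x = zs.count x + 1 := by
        simp [List.count_append]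
      rw [this]
      push_cast
      exact pv_choose2_step (zs.count x)
  · have hxz : x ∉ zs := fun h => hx ((PySem.Set.mem_ofList zs x).mpr h)
    simp only [hx, if_false]
    rw [List.map_append, List.sum_append]
    have h1 : ∀ k ∈ PySem.Set.ofList zs,
        pvF ((zs ++ [x]).count k) = pvF (zs.count k) := by
      intro k hk
      have hkx : k ≠ x := fun h => hxz (h ▸ (PySem.Set.mem_ofList zs k).mp hk)
      simp [List.count_append, Ne.symm hkx]
    rw [List.map_congr_left h1]
    have hcx : zs.count x = 0 := List.count_eq_zero.mpr hxz
    simp [List.count_append, hcx, pvF, PySem.Int.floordiv]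

-- one insert-and-bump step extends a counter by one occurrence
lemma pv_counter_insert (xs : List Int) (x : Int) :
    PySem.Dict.counter (xs ++ [x])
      = (PySem.Dict.counter xs).insert x ((PySem.Dict.counter xs).getD x 0 + 1) := by
  rw [← PySem.Dict.foldl_insert_getD_add_one_eq_counter,
    ← PySem.Dict.foldl_insert_getD_add_one_eq_counter, List.foldl_append]
  simp

-- A's loop invariant: the running count is the tally of the two counters built so far
lemma pv_loopA (bs : List (Int × Int)) :
    bs.foldl pvStepA (PySem.Dict.empty, PySem.Dict.empty, 0)
      = (PySem.Dict.counter (bs.map (fun rc => rc.1 - rc.2)),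
         PySem.Dict.counter (bs.map (fun rc => rc.1 + rc.2)),
         pvTallyCount (bs.map (fun rc => rc.1 - rc.2))
           + pvTallyCount (bs.map (fun rc => rc.1 + rc.2))) := by
  induction bs using List.reverseRecOn with
  | nil => rfl
  | append_singleton t b ih =>
    rw [List.foldl_append, ih]
    simp only [List.foldl_cons, List.foldl_nil, List.map_append, List.map_cons, List.map_nil]
    unfold pvStepA
    simp only [Prod.mk.injEq]
    refine ⟨?_, ?_, ?_⟩
    · rw [pv_counter_insert]
    · rw [pv_counter_insert]
    · rw [pv_tally_append, pv_tally_append, PySem.Dict.getD_counter, PySem.Dict.getD_counter]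
      ring

-- folding Set.add onto a prefix no element of v touches keeps the prefix intact
lemma pv_update_disjoint (s w : List Int) (v : List Int) (h : ∀ x ∈ v, x ∉ s) :
    List.foldl PySem.Set.add (s ++ w) v = s ++ List.foldl PySem.Set.add w v := by
  induction v generalizing w with
  | nil => rfl
  | cons x v ih =>
    have hx : x ∉ s := h x List.mem_cons_self
    have hstep : PySem.Set.add (s ++ w) x = s ++ PySem.Set.add w x := by
      rw [PySem.Set.add_eq_ite, PySem.Set.add_eq_ite]
      by_cases hw : x ∈ w
      · simp [hw, List.mem_append, hx]
      · simp [hw, List.mem_append, hx]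
    rw [List.foldl_cons, List.foldl_cons, hstep, ih _ (fun y hy => h y (List.mem_cons_of_mem _ hy))]

-- tallies of key-disjoint lists add
lemma pv_tally_disjoint (u v : List Int) (h : ∀ x ∈ u, x ∉ v) :
    pvTallyCount (u ++ v) = pvTallyCount u + pvTallyCount v := by
  unfold pvTallyCount
  have hofl : PySem.Set.ofList (u ++ v) = PySem.Set.ofList u ++ PySem.Set.ofList v := by
    rw [PySem.Set.ofList_eq_foldl, List.foldl_append, ← PySem.Set.ofList_eq_foldl]
    have := pv_update_disjoint (PySem.Set.ofList u) [] v
      (fun x hx hmem => h x ((PySem.Set.mem_ofList u x).mp hmem) hx)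
    simpa [PySem.Set.ofList_eq_foldl] using this
  rw [hofl, List.map_append, List.sum_append]
  congr 1
  · refine congrArg List.sum (List.map_congr_left ?_)
    intro k hk
    have : k ∉ v := h k ((PySem.Set.mem_ofList u k).mp hk)
    simp [List.count_append, List.count_eq_zero.mpr this]
  · refine congrArg List.sum (List.map_congr_left ?_)
    intro k hk
    have hkv : k ∈ v := (PySem.Set.mem_ofList v k).mp hk
    have : k ∉ u := fun hku => h k hku hkv
    simp [List.count_append, List.count_eq_zero.mpr this]

-- folding duplicates of an element already present changes nothing
lemma pv_foldl_add_self (m : Nat) (p : Int) :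
    List.foldl PySem.Set.add [p] (List.replicate m p) = [p] := by
  induction m with
  | zero => rfl
  | succ m ih =>
    rw [List.replicate_succ, List.foldl_cons]
    have : PySem.Set.add [p] p = [p] := by simp
    rw [this, ih]

-- tally of a constant run
lemma pv_tally_replicate (n : Nat) (p : Int) :
    pvTallyCount (List.replicate n p) = pvF (n : Int) := by
  cases n with
  | zero => simp [pvTallyCount, pvF, PySem.Int.floordiv]
  | succ m =>
    unfold pvTallyCount
    have hofl : PySem.Set.ofList (List.replicate (m + 1) p) = [p] := by
      rw [PySem.Set.ofList_eq_foldl, List.replicate_succ, List.foldl_cons]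
      have : PySem.Set.add [] p = [p] := by simp
      rw [this, pv_foldl_add_self]
    rw [hofl]
    simp

-- B's scan invariant on a sorted tail: a pending run of n copies of p, all of the
-- tail at least p
lemma pv_scan_go (s : List Int) (p t : Int) (n : Nat)
    (hs : s.Pairwise (· ≤ ·)) (hp : ∀ x ∈ s, p ≤ x) :
    (s.foldl pvScanStep (t, (n : Int), some p)).1
      + pvF (s.foldl pvScanStep (t, (n : Int), some p)).2.1
      = t + pvTallyCount (List.replicate n p ++ s) := by
  induction s generalizing p t n with
  | nil => simp [pv_tally_replicate]
  | cons k ks ih =>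
    rcases List.pairwise_cons.mp hs with ⟨hk_le, hks⟩
    by_cases hpk : p = k
    · subst hpk
      have hstep : pvScanStep (t, (n : Int), some p) p = (t, (n : Int) + 1, some p) := by
        simp [pvScanStep]
      rw [List.foldl_cons, hstep, show ((n : Int) + 1) = ((n + 1 : Nat) : Int) by push_cast; ring,
        ih p t (n + 1) hks hk_le, List.replicate_succ', List.append_assoc]
      rfl
    · have hstep : pvScanStep (t, (n : Int), some p) k = (t + pvF n, ((1 : Nat) : Int), some k) := by
        simp [pvScanStep, hpk]
      have hplt : ∀ x ∈ k :: ks, p < x := by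
        intro x hx
        rcases List.mem_cons.mp hx with rfl | hx'
        · exact lt_of_le_of_ne (hp x hx) hpk
        · exact lt_of_lt_of_le (lt_of_le_of_ne (hp k List.mem_cons_self) hpk) (hk_le x hx')
      have hdisj : ∀ x ∈ List.replicate n p, x ∉ (k :: ks) := by
        intro x hx hmem
        rw [List.eq_of_mem_replicate hx] at hmem
        exact lt_irrefl p (hplt p hmem)
      rw [List.foldl_cons, hstep, ih k (t + pvF n) 1 hks hk_le,
        pv_tally_disjoint _ _ hdisj, pv_tally_replicate]
      simp [List.replicate_succ]
      ring

-- the whole scan computes the tally of the sorted key list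
lemma pv_scan_eq_tally (s : List Int) (hs : s.Pairwise (· ≤ ·)) :
    (s.foldl pvScanStep (0, 0, none)).1 + pvF (s.foldl pvScanStep (0, 0, none)).2.1
      = pvTallyCount s := by
  cases s with
  | nil => simp [pvF, PySem.Int.floordiv, pvTallyCount]
  | cons k ks =>
    have hstep : pvScanStep (0, 0, none) k = (0 + pvF 0, 1, some k) := by
      simp [pvScanStep]
    have hf0 : pvF 0 = 0 := by simp [pvF, PySem.Int.floordiv]
    rw [List.foldl_cons, hstep, hf0]
    have := pv_scan_go ks k 0 1 (List.pairwise_cons.mp hs).2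
      (List.pairwise_cons.mp hs).1
    simpa using this

-- pvTallyCount is invariant under permutation of the keys
lemma pv_tally_perm (zs ys : List Int) (h : zs.Perm ys) :
    pvTallyCount zs = pvTallyCount ys := by
  unfold pvTallyCount
  have hperm : (PySem.Set.ofList zs).Perm (PySem.Set.ofList ys) := by
    refine (List.perm_ext_iff_of_nodup (PySem.Set.nodup_ofList _) (PySem.Set.nodup_ofList _)).mpr ?_
    intro a
    simp [PySem.Set.mem_ofList, h.mem_iff]
  calc ((PySem.Set.ofList zs).map (fun k => pvF (zs.count k))).sum
      = ((PySem.Set.ofList zs).map (fun k => pvF (ys.count k))).sum := by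
        apply congrArg
        apply List.map_congr_left
        intro k _
        rw [h.count_eq]
    _ = ((PySem.Set.ofList ys).map (fun k => pvF (ys.count k))).sum :=
        (hperm.map _).sum_eq

-- B computes the tally of each key list
lemma pv_diag_eq_tally (keys : List Int) :
    pvPairsOnDiagonal keys = pvTallyCount keys := by
  unfold pvPairsOnDiagonal
  rw [pv_scan_eq_tally _ (by simpa using PySem.List.sorted_map_key_pairwise keys (fun x => x))]
  exact pv_tally_perm _ _ (PySem.List.sorted_perm keys (fun x => x) false)

-- ===== VERDICT (by name: the statement is the Claim_ definition above) =====
theorem count_attacking_pairs_spec : Claim_equal_count_attacking_pairs := by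
  intro bishops _
  unfold Spec_count_attacking_pairs count_attacking_pairs count_attacking_pairs_alt
  rw [pv_loopA, pv_diag_eq_tally, pv_diag_eq_tally]
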